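-- pv_equiv track=rewrite | github.com/nithinsubbiah/computer_vision | VQA/student_code/vqa_dataset.py | _create_id_map
-- ===== SOURCE A (Python) =====
-- import operator
-- from itertools import islice
--
-- def take(n, iterable):
--     "Return first n items of the iterable as a list"
--     return list(islice(iterable, n))
--
-- def _create_id_map(word_list, max_list_length):
--     """
--     Find the most common str in a list, then create a map from str to id (its rank in the frequency)
--     Args:
--         word_list: a list of str, where the most frequent elements are picked out
--         max_list_length: the number of strs picked
--     Return:
--         A map (dict) from str to id (rank)
--     """
--
--     freq_words = {}
--
--     for word in word_list:
--         if word in freq_words: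
--             freq_words[word] += 1
--         else:
--             freq_words[word] = 1
--
--     # Sort dictionary by frequency of words
--     freq_words = dict(sorted(freq_words.items(), key=operator.itemgetter(1),reverse=True))
--
--     # Update dictionary for the max list length
--     freq_words = take(max_list_length,freq_words.items())
--
--     freq_words = [(val[0], idx) for idx, val in enumerate(freq_words)]
--     freq_words = dict(freq_words)
--
--     return freq_words
-- ===== SOURCE B (Python) =====
-- def _create_id_map(word_list, max_list_length):
--     counts = {}
--     for w in word_list:
--         counts[w] = counts.get(w, 0) + 1
--     buckets = {}
--     for w, c in counts.items():
--         buckets.setdefault(c, []).append(w)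
--     ranked = []
--     for f in range(max(buckets, default=0), 0, -1):
--         ranked.extend(buckets.get(f, []))
--     ranked = ranked[:max_list_length]
--     return {w: i for i, w in enumerate(ranked)}
-- ===== Notes on version B (the rewrite author's own statement) =====
-- stated objective: alternative
-- what changed: Replaces A's comparison sort of the frequency table by a counting/bucket pass: words are grouped into buckets keyed by their frequency (dict insertion order preserved) and the buckets are concatenated from the maximum frequency down to 1, which reproduces the stable descending sort exactly.
import Mathlib
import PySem

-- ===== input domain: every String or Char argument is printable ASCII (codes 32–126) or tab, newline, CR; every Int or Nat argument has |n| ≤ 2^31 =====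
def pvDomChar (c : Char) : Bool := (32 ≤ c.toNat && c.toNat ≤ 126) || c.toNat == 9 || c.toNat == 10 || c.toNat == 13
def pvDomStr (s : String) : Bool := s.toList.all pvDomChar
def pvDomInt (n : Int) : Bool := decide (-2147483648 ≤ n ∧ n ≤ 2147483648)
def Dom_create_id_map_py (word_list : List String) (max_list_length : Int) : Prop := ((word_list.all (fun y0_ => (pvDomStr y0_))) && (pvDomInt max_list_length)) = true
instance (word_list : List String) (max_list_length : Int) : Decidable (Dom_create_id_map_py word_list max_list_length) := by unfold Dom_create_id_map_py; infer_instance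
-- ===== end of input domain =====

-- B replaces A's comparison sort of the frequency table by a counting/bucket pass over frequencies (objective: alternative algorithm).

-- ===== PORT A =====
-- A's `take(n, iterable) = list(islice(iterable, n))`: first n items; Python raises ValueError for n < 0 (excluded by Pre_).
def create_id_map_py (word_list : List String) (max_list_length : Int) : List (String × Int) :=
  -- for word in word_list: if word in freq_words: freq_words[word] += 1 else: freq_words[word] = 1
  let freq_words : PySem.Dict String Int :=
    word_list.foldl (fun d word => if d.contains word then d.modify word 0 (· + 1) else d.insert word 1)
      PySem.Dict.empty
  -- dict(sorted(freq_words.items(), key=itemgetter(1), reverse=True)) — as an items list the dict wrapper is the identity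
  let sortedItems := PySem.List.sorted freq_words.items (fun p => p.2) true
  -- take(max_list_length, freq_words.items())
  let taken := sortedItems.take max_list_length.toNat
  -- [(val[0], idx) for idx, val in enumerate(freq_words)] ; dict(...)
  (PySem.Dict.ofList ((PySem.List.enumerate taken 0).map (fun p => (p.2.1, p.1)))).items

-- ===== PORT B =====
def create_id_map_py_alt (word_list : List String) (max_list_length : Int) : List (String × Int) :=
  -- counts[w] = counts.get(w, 0) + 1
  let counts : PySem.Dict String Int :=
    word_list.foldl (fun d w => d.insert w (d.getD w 0 + 1)) PySem.Dict.empty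
  -- buckets.setdefault(c, []).append(w)  ==  buckets[c] = buckets.get(c, []) + [w]
  let buckets : PySem.Dict Int (List String) :=
    counts.items.foldl (fun d p => d.modify p.2 [] (· ++ [p.1])) PySem.Dict.empty
  -- for f in range(max(buckets, default=0), 0, -1): ranked.extend(buckets.get(f, []))
  let ranked :=
    (PySem.List.pyRange (PySem.List.maxD buckets.keys (fun x => x) 0) 0 (-1)).foldl
      (fun acc f => acc ++ buckets.getD f []) []
  -- ranked = ranked[:max_list_length]
  let ranked' := PySem.List.slice ranked none (some max_list_length)
  -- {w: i for i, w in enumerate(ranked)}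
  (PySem.Dict.ofList ((PySem.List.enumerate ranked' 0).map (fun p => (p.2, p.1)))).items

-- ===== PRECONDITION & SPEC =====
-- Pre_ excludes max_list_length < 0, where A's islice raises ValueError (A returns on every other input).
def Pre_create_id_map_py (word_list : List String) (max_list_length : Int) : Prop :=
  0 ≤ max_list_length
instance (word_list : List String) (max_list_length : Int) : Decidable (Pre_create_id_map_py word_list max_list_length) := by unfold Pre_create_id_map_py; infer_instance
def pvWitness_create_id_map_py : List String × Int := (["b", "a", "b"], 2)

def Spec_create_id_map_py (word_list : List String) (max_list_length : Int) (out : List (String × Int)) : Prop := out = create_id_map_py_alt word_list max_list_length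
instance (word_list : List String) (max_list_length : Int) (out : List (String × Int)) : Decidable (Spec_create_id_map_py word_list max_list_length out) := by unfold Spec_create_id_map_py; infer_instance

-- ===== CLAIM (what is proved, stated in full; the proofs are below) =====
def Claim_equal_create_id_map_py : Prop := ∀ (word_list : List String) (max_list_length : Int), Dom_create_id_map_py word_list max_list_length → Pre_create_id_map_py word_list max_list_length → Spec_create_id_map_py word_list max_list_length (create_id_map_py word_list max_list_length)

-- ===== LEMMAS AND PROOFS =====

-- A's count loop body equals B's: both set d[w] to d.get(w, 0) + 1.
lemma count_step_eq :
    (fun (d : PySem.Dict String Int) word => if d.contains word then d.modify word 0 (· + 1) else d.insert word 1)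
      = fun (d : PySem.Dict String Int) w => d.insert w (d.getD w 0 + 1) := by
  funext d w
  by_cases h : d.contains w
  · simp [h, PySem.Dict.modify]
  · rw [if_neg (by simp [h]), PySem.Dict.getD_of_not_contains d 0 (by simpa using h)]
    norm_num

lemma insertBy_append_skip {α : Type} (bef : α → α → Bool) (x : α) (ys zs : List α)
    (h : ∀ y ∈ ys, bef x y = false) :
    PySem.List.insertBy bef x (ys ++ zs) = ys ++ PySem.List.insertBy bef x zs := by
  induction ys with
  | nil => simp
  | cons y ys ih =>
      simp only [List.cons_append, PySem.List.insertBy, h y (by simp)]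
      simp [ih fun y hy => h y (by simp [hy])]

lemma insertBy_front {α : Type} (bef : α → α → Bool) (x : α) (zs : List α)
    (h : ∀ y ∈ zs, bef x y = true) :
    PySem.List.insertBy bef x zs = x :: zs := by
  cases zs with
  | nil => rfl
  | cons z zs => simp [PySem.List.insertBy, h z (by simp)]

lemma mem_pyRange_neg_one (n : Nat) : ∀ (a c : Int), a.toNat ≤ n →
    (c ∈ PySem.List.pyRange a 0 (-1) ↔ 0 < c ∧ c ≤ a) := by
  induction n with
  | zero =>
      intro a c ha
      have h0 : a ≤ 0 := by omega
      rw [show PySem.List.pyRange a 0 (-1) = [] from by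
        simp [PySem.List.pyRange]; omega]
      simp; omega
  | succ n ih =>
      intro a c ha
      by_cases hpos : 0 < a
      · rw [PySem.List.pyRange_neg_one_cons hpos, List.mem_cons, ih (a - 1) c (by omega)]
        omega
      · rw [show PySem.List.pyRange a 0 (-1) = [] from by
          simp [PySem.List.pyRange]; omega]
        simp; omega

lemma pairwise_pyRange_neg_one (n : Nat) : ∀ (a : Int), a.toNat ≤ n →
    (PySem.List.pyRange a 0 (-1)).Pairwise (fun x y => y < x) := by
  induction n with
  | zero =>
      intro a ha
      rw [show PySem.List.pyRange a 0 (-1) = [] from by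
        simp [PySem.List.pyRange]; omega]
      simp
  | succ n ih =>
      intro a ha
      by_cases hpos : 0 < a
      · rw [PySem.List.pyRange_neg_one_cons hpos]
        refine List.Pairwise.cons ?_ (ih (a - 1) (by omega))
        intro y hy
        have := (mem_pyRange_neg_one (n := (a - 1).toNat) (a - 1) y le_rfl).1 hy
        omega
      · rw [show PySem.List.pyRange a 0 (-1) = [] from by
          simp [PySem.List.pyRange]; omega]
        simp

-- a stable reverse sort by an Int key is the concatenation of the key-classes, classes listed in decreasing key order
lemma sorted_rev_eq_flatMap_filter {α : Type} (key : α → Int) (D : List Int)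
    (hD : D.Pairwise (fun x y => y < x)) :
    ∀ xs : List α, (∀ p ∈ xs, key p ∈ D) →
      PySem.List.sorted xs key true = D.flatMap (fun f => xs.filter (fun p => key p == f)) := by
  intro xs
  induction xs using List.reverseRecOn with
  | nil =>
      intro _
      rw [show PySem.List.sorted ([] : List α) key true = [] from rfl]
      exact (List.flatMap_eq_nil_iff.mpr fun x _ => rfl).symm
  | append_singleton xs x ih =>
      intro hmem
      have hx : key x ∈ D := hmem x (by simp)
      obtain ⟨D1, D2, rfl⟩ := List.append_of_mem hx
      rw [List.pairwise_append] at hD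
      obtain ⟨hD1, hD2', hcross⟩ := hD
      have hD2 : D2.Pairwise (fun x y => y < x) := (List.pairwise_cons.1 hD2').2
      have hgt1 : ∀ f ∈ D1, key x < f := fun f hf => hcross f hf (key x) (by simp)
      have hlt2 : ∀ f ∈ D2, f < key x := (List.pairwise_cons.1 hD2').1
      have hprev := ih (fun p hp => hmem p (by simp [hp]))
      rw [PySem.List.sorted_rev_eq_foldl_insertBy, List.foldl_append, List.foldl_cons, List.foldl_nil,
        ← PySem.List.sorted_rev_eq_foldl_insertBy, hprev]
      simp only [List.flatMap_append, List.flatMap_cons]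
      rw [← List.append_assoc]
      rw [insertBy_append_skip _ x _ _ (by
        intro y hy
        simp only [List.mem_append, List.mem_flatMap, List.mem_filter] at hy
        rcases hy with ⟨f, hf, _, hk⟩ | ⟨_, hk⟩
        · have : key y = f := by simpa using hk
          have := hgt1 f hf
          simp only [decide_eq_false_iff_not, not_lt]
          omega
        · have : key y = key x := by simpa using hk
          simp [this])]
      rw [insertBy_front _ x _ (by
        intro y hy
        simp only [List.mem_flatMap, List.mem_filter] at hy
        obtain ⟨f, hf, _, hk⟩ := hy
        have : key y = f := by simpa using hk
        have := hlt2 f hf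
        simp only [decide_eq_true_eq]
        omega)]
      -- now both sides are blocks; compare blockwise
      have hblock1 : ∀ f ∈ D1, (xs ++ [x]).filter (fun p => key p == f) = xs.filter (fun p => key p == f) := by
        intro f hf
        have := hgt1 f hf
        simp only [List.filter_append, List.filter_cons, List.filter_nil]
        have : (key x == f) = false := by simp; omega
        simp [this]
      have hblock2 : ∀ f ∈ D2, (xs ++ [x]).filter (fun p => key p == f) = xs.filter (fun p => key p == f) := by
        intro f hf
        have := hlt2 f hf
        simp only [List.filter_append, List.filter_cons, List.filter_nil]
        have : (key x == f) = false := by simp; omega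
        simp [this]
      have hblockx : (xs ++ [x]).filter (fun p => key p == key x) = xs.filter (fun p => key p == key x) ++ [x] := by
        simp [List.filter_append]
      rw [List.flatMap_congr hblock1, hblockx, List.flatMap_congr hblock2]
      simp

lemma getD_bucket : ∀ (l : List (String × Int)) (b : PySem.Dict Int (List String)) (f : Int),
    (l.foldl (fun b p => b.modify p.2 [] (· ++ [p.1])) b).getD f []
      = b.getD f [] ++ (l.filter (fun p => p.2 == f)).map (fun p => p.1) := by
  intro l
  induction l with
  | nil => intro b f; simp
  | cons p l ih =>
      intro b f
      rw [List.foldl_cons, ih, PySem.Dict.getD_modify, List.filter_cons]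
      by_cases hf : p.2 = f
      · simp [hf]
      · simp [hf, Ne.symm hf]

lemma enumerate_map {α β : Type} (g : α → β) : ∀ (ys : List α) (s : Int),
    PySem.List.enumerate (ys.map g) s = (PySem.List.enumerate ys s).map (fun p => (p.1, g p.2)) := by
  intro ys
  induction ys with
  | nil => intro s; simp [PySem.List.enumerate]
  | cons y ys ih => intro s; simp [PySem.List.enumerate_cons, ih]

-- ===== VERDICT (by name: the statement is the Claim_ definition above) =====
theorem create_id_map_py_spec : Claim_equal_create_id_map_py := by
  intro wl n _ hpre
  unfold Spec_create_id_map_py create_id_map_py create_id_map_py_alt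
  dsimp only
  rw [count_step_eq, PySem.Dict.foldl_insert_getD_add_one_eq_counter]
  set d := PySem.Dict.counter wl with hd
  set items := d.items with hitems
  set buckets := items.foldl (fun b p => b.modify p.2 [] (· ++ [p.1]))
    (PySem.Dict.empty : PySem.Dict Int (List String)) with hb
  set M := PySem.List.maxD buckets.keys (fun x => x) 0 with hM
  set D := PySem.List.pyRange M 0 (-1) with hDdef
  have hgetD : ∀ f, buckets.getD f [] = (items.filter (fun p => p.2 == f)).map (fun p => p.1) := by
    intro f
    rw [hb, getD_bucket items PySem.Dict.empty f]
    simp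
  have hkeys : buckets.keys = PySem.Set.ofList (items.map (fun p => p.2)) := by
    rw [hb, PySem.Dict.keys_foldl_modify_key items (fun p => p.2) [] (fun _ p => (· ++ [p.1]))]
    rfl
  have hmemD : ∀ p ∈ items, p.2 ∈ D := by
    intro p hp
    have hval : p.2 ∈ buckets.keys := by
      rw [hkeys]
      exact (PySem.Set.mem_ofList _ _).mpr (List.mem_map_of_mem hp)
    have hpos : 0 < p.2 := by
      have hic := PySem.Dict.items_counter wl
      rw [hitems, hd, hic] at hp
      obtain ⟨k, hk, rfl⟩ := List.mem_map.1 hp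
      have hkwl : k ∈ wl := (PySem.Set.mem_ofList _ _).mp hk
      have := List.count_pos_iff.mpr hkwl
      simpa using this
    have hle : p.2 ≤ M := by
      cases hmax : PySem.List.max? buckets.keys (fun x => x) with
      | none =>
          rw [PySem.List.max?_eq_none_iff] at hmax
          rw [hmax] at hval
          simp at hval
      | some m =>
          have h1 := PySem.List.max?_isMax hmax p.2 hval
          have h2 : M = m := by rw [hM, PySem.List.maxD, hmax]; rfl
          omega
    show p.2 ∈ PySem.List.pyRange M 0 (-1)
    exact (mem_pyRange_neg_one M.toNat M p.2 le_rfl).mpr ⟨hpos, hle⟩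
  have hsorted : PySem.List.sorted items (fun p => p.2) true
      = D.flatMap (fun f => items.filter (fun p => p.2 == f)) :=
    sorted_rev_eq_flatMap_filter (fun p => p.2) D
      (hDdef ▸ pairwise_pyRange_neg_one M.toNat M le_rfl) items hmemD
  have hranked : D.foldl (fun acc f => acc ++ buckets.getD f []) []
      = (PySem.List.sorted items (fun p => p.2) true).map (fun p => p.1) := by
    rw [PySem.List.foldl_append_eq_flatMap, List.nil_append, hsorted, List.map_flatMap]
    exact List.flatMap_congr (fun f _ => hgetD f)
  rw [hranked, PySem.List.slice_to _ hpre, ← List.map_take, enumerate_map]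
  simp [List.map_map, Function.comp_def]
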